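-- pv_equiv track=rewrite | github.com/NicolaDes/turingarenaExamples | caffe/evaluate.py | solve
-- ===== SOURCE A (Python) =====
-- def solve(N, A, B):
--     T = [None]*2*N
--     for i in range(0, N):
--         T[i] = 2*A[i]+1
--     for i in range(0, N):
--         T[N+i] = 2*B[i]
--     T.sort()
--     for i in range(0, 2*N):
--         T[i] %= 2
--     c = 0
--     caffe = 0
--     for i in range(0, 2*N):
--         if T[i] == 1:
--             c = c+1
--             caffe += c
--         else:
--             c = c-1
--     return caffe
-- ===== SOURCE B (Python) =====
-- def solve(N, A, B):
--     # closed form: the A-encodings always contribute 1+2+...+N; subtract, for each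
--     # of the first N A-values, the number of B-values (first N) that are <= it,
--     # found by binary search in the sorted B-prefix.
--     if N <= 0:
--         return 0
--     bs = sorted(B[:N])
--     total = N * (N + 1) // 2
--     for a in A[:N]:
--         lo = 0
--         hi = N
--         while lo < hi:
--             mid = (lo + hi) // 2
--             if bs[mid] <= a:
--                 lo = mid + 1
--             else:
--                 hi = mid
--         total -= lo
--     return total
-- ===== Notes on version B (the rewrite author's own statement) =====
-- stated objective: alternative
-- what changed: Replaces the merge-sort-of-encodings + parity running-balance sweep by a closed form N*(N+1)//2 minus a pair-domination count obtained by binary search over the sorted B-prefix alone.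
import Mathlib
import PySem

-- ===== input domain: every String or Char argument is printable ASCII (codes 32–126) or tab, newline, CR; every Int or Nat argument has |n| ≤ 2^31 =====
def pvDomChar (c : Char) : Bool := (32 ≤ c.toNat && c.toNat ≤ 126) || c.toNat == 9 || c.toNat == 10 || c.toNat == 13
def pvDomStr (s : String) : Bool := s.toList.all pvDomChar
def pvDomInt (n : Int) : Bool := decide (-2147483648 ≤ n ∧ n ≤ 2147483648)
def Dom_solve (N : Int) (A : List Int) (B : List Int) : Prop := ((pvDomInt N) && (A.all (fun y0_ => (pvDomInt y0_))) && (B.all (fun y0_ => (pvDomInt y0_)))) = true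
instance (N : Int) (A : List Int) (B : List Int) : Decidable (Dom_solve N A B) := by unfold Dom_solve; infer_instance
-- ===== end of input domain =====

-- B replaces A's sort-the-2N-encodings + parity running-balance sweep by the closed form
-- N*(N+1)//2 minus a pair-domination count found by binary search over the sorted B-prefix
-- (objective: alternative algorithm of the same asymptotic cost).

-- ===== PORT A =====
-- The two index-fill loops into [None]*2*N fill the two halves of T exactly, so they are
-- ported as two maps over range(0, N); the in-place '%= 2' loop over range(0, 2*N) and the
-- final sweep over range(0, 2*N) are ported as a map and a fold over T itself (T has length
-- exactly 2*N whenever A returns, and for N ≤ 0 both T and the ranges are empty).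
def solve (N : Int) (A : List Int) (B : List Int) : Int :=
  let T : List Int :=
    (PySem.List.pyRange 0 N).map (fun i => 2 * PySem.List.pyGetD A i 0 + 1)
      ++ (PySem.List.pyRange 0 N).map (fun i => 2 * PySem.List.pyGetD B i 0)
  let Ts := PySem.List.sorted T (fun x => x)
  let Tm := Ts.map (fun x => PySem.Int.mod x 2)
  let cc := Tm.foldl
    (fun (s : Int × Int) t => if t = 1 then (s.1 + 1, s.2 + (s.1 + 1)) else (s.1 - 1, s.2))
    (0, 0)
  cc.2

-- ===== PORT B =====
-- the hand-written 'while lo < hi' binary search of Source B, transcribed step for step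
def bsLoop (bs : List Int) (a : Int) (lo hi : Int) : Int :=
  if h : lo < hi then
    let mid := PySem.Int.floordiv (lo + hi) 2
    if PySem.List.pyGetD bs mid 0 ≤ a then bsLoop bs a (mid + 1) hi
    else bsLoop bs a lo mid
  else lo
termination_by (hi - lo).toNat
decreasing_by
  · have hb := PySem.Int.floordiv_two_mid_bounds (le_of_lt h)
    omega
  · have hb := PySem.Int.floordiv_two_mid_bounds (le_of_lt h)
    have hlt : PySem.Int.floordiv (lo + hi) 2 < hi :=
      (PySem.Int.floordiv_lt_iff_lt_mul (by omega)).mpr (by omega)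
    omega

def solve_alt (N : Int) (A : List Int) (B : List Int) : Int :=
  if N ≤ 0 then 0
  else
    let bs := PySem.List.sorted (PySem.List.slice B none (some N)) (fun x => x)
    let total := PySem.Int.floordiv (N * (N + 1)) 2
    (PySem.List.slice A none (some N)).foldl (fun tot a => tot - bsLoop bs a 0 N) total

-- ===== PRECONDITION & SPEC =====
-- Pre_solve: exactly where A returns: for 0 < N, A reads A[i] and B[i] for every i < N and
-- raises IndexError when either list is shorter than N; for N ≤ 0 every loop is empty.
def Pre_solve (N : Int) (A : List Int) (B : List Int) : Prop :=
  N ≤ 0 ∨ (N ≤ (A.length : Int) ∧ N ≤ (B.length : Int))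
instance (N : Int) (A : List Int) (B : List Int) : Decidable (Pre_solve N A B) := by
  unfold Pre_solve; infer_instance
def pvWitness_solve : Int × List Int × List Int := (2, ([1, 3], [2, 0]))

def Spec_solve (N : Int) (A : List Int) (B : List Int) (out : Int) : Prop := out = solve_alt N A B
instance (N : Int) (A : List Int) (B : List Int) (out : Int) : Decidable (Spec_solve N A B out) := by unfold Spec_solve; infer_instance

-- ===== CLAIM (what is proved, stated in full; the proofs are below) =====
def Claim_equal_solve : Prop := ∀ (N : Int) (A : List Int) (B : List Int), Dom_solve N A B → Pre_solve N A B → Spec_solve N A B (solve N A B)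

-- ===== LEMMAS AND PROOFS =====

-- x is an odd integer (Python x % 2 == 1)
def pvOdd (x : Int) : Bool := PySem.Int.mod x 2 == 1

-- "the even one of {x, y} is smaller than the odd one" — a symmetric inversion test
def pvCross (x y : Int) : Bool :=
  (!pvOdd x && pvOdd y && decide (x < y)) || (!pvOdd y && pvOdd x && decide (y < x))

-- number of (even element, odd element strictly later) POSITION pairs in L
def pvX : List Int → Int
  | [] => 0
  | x :: r => (if pvOdd x then 0 else (r.countP pvOdd : Int)) + pvX r

-- number of unordered pairs of L related by pvCross (position-free)
def pvC : List Int → Int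
  | [] => 0
  | x :: r => ((r.countP (pvCross x) : Int)) + pvC r

lemma pvCross_comm (x y : Int) : pvCross x y = pvCross y x := by
  simp [pvCross, Bool.or_comm]

lemma pvCross_of_le {x y : Int} (h : x ≤ y) : pvCross x y = (!pvOdd x && pvOdd y) := by
  rcases eq_or_lt_of_le h with rfl | hlt
  · cases hx : pvOdd x <;> simp [pvCross, hx]
  · simp [pvCross, hlt, not_lt_of_gt hlt]

-- the doubled running-balance sweep formula over the (x % 2)-mapped list
lemma sweep_formula (L : List Int) (c k : Int) :
    2 * (L.foldl
      (fun (s : Int × Int) x =>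
        if PySem.Int.mod x 2 = 1 then (s.1 + 1, s.2 + (s.1 + 1)) else (s.1 - 1, s.2)) (c, k)).2
      = 2 * k + 2 * c * (L.countP pvOdd : Int)
        + (L.countP pvOdd : Int) * ((L.countP pvOdd : Int) + 1) - 2 * pvX L := by
  induction L generalizing c k with
  | nil => simp [pvX]
  | cons x r ih =>
    rcases PySem.Int.mod_two_eq x with h | h
    · have hx : pvOdd x = false := by simp only [pvOdd, h]; decide
      rw [List.foldl_cons, if_neg (by rw [h]; norm_num), ih]
      simp only [pvX, List.countP_cons, hx, if_false, Bool.false_eq_true, Nat.add_zero]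
      push_cast
      ring
    · have hx : pvOdd x = true := by simp only [pvOdd, h]; decide
      rw [List.foldl_cons, if_pos h, ih]
      simp only [pvX, List.countP_cons, hx, if_true, Nat.add_one]
      push_cast
      ring

lemma pvX_eq_pvC {L : List Int} (h : L.Pairwise (· ≤ ·)) : pvX L = pvC L := by
  induction L with
  | nil => rfl
  | cons x r ih =>
    rcases List.pairwise_cons.mp h with ⟨hx, hr⟩
    have hcnt : r.countP (pvCross x) = r.countP (fun y => !pvOdd x && pvOdd y) :=
      List.countP_congr (fun y hy => by rw [pvCross_of_le (hx y hy)])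
    simp only [pvX, pvC, ih hr, hcnt]
    cases hox : pvOdd x <;> simp [hox]

lemma pvC_perm {L L' : List Int} (h : L.Perm L') : pvC L = pvC L' := by
  induction h with
  | nil => rfl
  | cons x h ih => simp only [pvC, ih, h.countP_eq]
  | swap x y l =>
    simp only [pvC, List.countP_cons]
    rw [pvCross_comm x y]
    cases h : pvCross y x <;> simp [h] <;> push_cast <;> ring
  | trans _ _ ih1 ih2 => exact ih1.trans ih2

lemma pvC_append (xs ys : List Int) :
    pvC (xs ++ ys) = pvC xs + pvC ys + (xs.map (fun x => (ys.countP (pvCross x) : Int))).sum := by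
  induction xs with
  | nil => simp [pvC]
  | cons x r ih =>
    simp only [List.cons_append, pvC, List.countP_append, ih, List.map_cons, List.sum_cons]
    push_cast
    ring

lemma pvC_const_parity {L : List Int} (b : Bool) (h : ∀ x ∈ L, pvOdd x = b) : pvC L = 0 := by
  induction L with
  | nil => rfl
  | cons x r ih =>
    have hx := h x (by simp)
    have hz : r.countP (pvCross x) = 0 := by
      apply List.countP_eq_zero.mpr
      intro y hy
      have hyb := h y (List.mem_cons_of_mem _ hy)
      cases b <;> simp [pvCross, hx, hyb] at *
    simp [pvC, hz, ih (fun y hy => h y (List.mem_cons_of_mem _ hy))]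

lemma pvOdd_enc_a (a : Int) : pvOdd (2 * a + 1) = true := by
  rcases PySem.Int.mod_two_eq (2 * a + 1) with h | h
  · exfalso
    rcases (PySem.Int.mod_eq_zero_iff_dvd (2 * a + 1) 2).mp h with ⟨r, hr⟩
    omega
  · simp [pvOdd, h]

lemma pvOdd_enc_b (b : Int) : pvOdd (2 * b) = false := by
  have h : PySem.Int.mod (2 * b) 2 = 0 :=
    (PySem.Int.mod_eq_zero_iff_dvd (2 * b) 2).mpr ⟨b, by ring⟩
  simp [pvOdd, h]

lemma pvCross_enc (a b : Int) : pvCross (2 * a + 1) (2 * b) = decide (b ≤ a) := by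
  simp only [pvCross, pvOdd_enc_a, pvOdd_enc_b, Bool.not_true, Bool.not_false,
    Bool.false_and, Bool.and_false, Bool.true_and, Bool.and_true, Bool.false_or]
  exact decide_eq_decide.mpr (by omega)

-- x - g(x) accumulation is subtraction of a sum
lemma pv_foldl_sub (l : List Int) (g : Int → Int) (a : Int) :
    l.foldl (fun acc x => acc - g x) a = a - (l.map g).sum := by
  induction l generalizing a with
  | nil => simp
  | cons x r ih => simp only [List.foldl_cons, ih, List.map_cons, List.sum_cons]; ring

-- an empty Python range
lemma pv_pyRange_nil {N : Int} (h : N ≤ 0) : PySem.List.pyRange 0 N = [] := by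
  rw [List.eq_nil_iff_forall_not_mem]
  intro x hx
  have hm := (PySem.List.mem_pyRange_one).mp hx
  omega

-- reading the first n entries of xs through pyGetD is taking its prefix
lemma pv_map_pyGetD_take (xs : List Int) (f : Int → Int) (n : Nat) (hn : n ≤ xs.length) :
    (PySem.List.pyRange 0 (n : Int)).map (fun i => f (PySem.List.pyGetD xs i 0))
      = (xs.take n).map f := by
  rw [PySem.List.pyRange_zero_natCast, List.map_map]
  apply List.ext_getElem
  · simp [hn]
  · intro i h1 h2
    simp only [List.getElem_map, List.getElem_range, Function.comp_apply]
    rw [PySem.List.pyGetD_eq_getElem xs 0 (by positivity)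
      (by simp at h1; exact_mod_cast Nat.lt_of_lt_of_le (by omega) hn)]
    simp only [Int.toNat_natCast, List.getElem_take]

-- the binary search returns the number of elements ≤ a of a sorted list
lemma bsLoop_count (bs : List Int) (a : Int) (hs : bs.Pairwise (· ≤ ·)) :
    ∀ (n : Nat) (lo hi : Int), (hi - lo).toNat = n → 0 ≤ lo → lo ≤ hi → hi ≤ (bs.length : Int) →
      (∀ (i : Nat) (h : i < bs.length), (i : Int) < lo → bs[i] ≤ a) →
      (∀ (i : Nat) (h : i < bs.length), hi ≤ (i : Int) → a < bs[i]) →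
      bsLoop bs a lo hi = (bs.countP (fun b => decide (b ≤ a)) : Int) := by
  intro n
  induction n using Nat.strong_induction_on with
  | _ n ih =>
    intro lo hi hn h0 hlh hlen hlo hhi
    rw [bsLoop]
    by_cases h : lo < hi
    · rw [dif_pos h]
      have hb := PySem.Int.floordiv_two_mid_bounds (le_of_lt h)
      have hltm : PySem.Int.floordiv (lo + hi) 2 < hi :=
        (PySem.Int.floordiv_lt_iff_lt_mul (by omega)).mpr (by omega)
      set mid := PySem.Int.floordiv (lo + hi) 2 with hmiddef
      have h0m : 0 ≤ mid := by omega
      have hmlen : mid < (bs.length : Int) := by omega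
      have hmn : mid.toNat < bs.length := by omega
      have hget : PySem.List.pyGetD bs mid 0 = bs[mid.toNat] :=
        PySem.List.pyGetD_eq_getElem bs 0 h0m hmlen
      have hmono : ∀ (i j : Nat) (h1 : i < bs.length) (h2 : j < bs.length), i ≤ j → bs[i] ≤ bs[j] := by
        intro i j h1 h2 hij
        rcases Nat.lt_or_ge i j with hij' | hij'
        · exact (List.pairwise_iff_getElem.mp hs) i j h1 h2 hij'
        · have : i = j := by omega
          subst this; exact le_refl _
      by_cases hc : PySem.List.pyGetD bs mid 0 ≤ a
      · rw [if_pos hc]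
        refine ih ((hi - (mid + 1)).toNat) (by omega) (mid + 1) hi rfl (by omega) (by omega) hlen ?_ hhi
        intro i hilen hilt
        have hle : bs[i] ≤ bs[mid.toNat] := hmono i mid.toNat hilen hmn (by omega)
        exact le_trans hle (hget ▸ hc)
      · rw [if_neg hc]
        refine ih ((mid - lo).toNat) (by omega) lo mid rfl h0 (by omega) (by omega) hlo ?_
        intro i hilen hile
        have hge : bs[mid.toNat] ≤ bs[i] := hmono mid.toNat i hmn hilen (by omega)
        have : a < bs[mid.toNat] := by rw [← hget]; omega
        omega
    · rw [dif_neg h]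
      have hEq : lo = hi := by omega
      have hcnt : bs.countP (fun b => decide (b ≤ a)) = lo.toNat := by
        have hsplit : bs.countP (fun b => decide (b ≤ a))
            = (bs.take lo.toNat).countP (fun b => decide (b ≤ a))
              + (bs.drop lo.toNat).countP (fun b => decide (b ≤ a)) := by
          conv_lhs => rw [← List.take_append_drop lo.toNat bs]
          rw [List.countP_append]
        have h1 : (bs.take lo.toNat).countP (fun b => decide (b ≤ a))
            = (bs.take lo.toNat).length := by
          apply List.countP_eq_length.mpr
          intro x hx
          rcases List.getElem_of_mem hx with ⟨i, hi, rfl⟩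
          have hi' : i < bs.length := by
            have := List.length_take_le lo.toNat bs
            have hmin : (bs.take lo.toNat).length = min lo.toNat bs.length := List.length_take ..
            omega
          rw [List.getElem_take]
          exact decide_eq_true (hlo i hi' (by
            have hmin : (bs.take lo.toNat).length = min lo.toNat bs.length := List.length_take ..
            omega))
        have h2 : (bs.drop lo.toNat).countP (fun b => decide (b ≤ a)) = 0 := by
          apply List.countP_eq_zero.mpr
          intro x hx
          rcases List.getElem_of_mem hx with ⟨i, hi, rfl⟩
          have hlend : (bs.drop lo.toNat).length = bs.length - lo.toNat := List.length_drop ..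
          rw [List.getElem_drop]
          have hlt : a < bs[lo.toNat + i]'(by omega) := hhi (lo.toNat + i) (by omega) (by omega)
          simp only [decide_eq_true_eq]
          omega
        have hlt1 : (bs.take lo.toNat).length = lo.toNat := by
          rw [List.length_take]; omega
        omega
      omega

lemma bsLoop_count_full (bs : List Int) (a : Int) (hs : bs.Pairwise (· ≤ ·)) :
    bsLoop bs a 0 (bs.length : Int) = (bs.countP (fun b => decide (b ≤ a)) : Int) :=
  bsLoop_count bs a hs _ 0 _ rfl le_rfl (by positivity) le_rfl
    (fun i h hlt => absurd hlt (by omega))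
    (fun i h hle => absurd hle (by omega))

-- ===== VERDICT (by name: the statement is the Claim_ definition above) =====
theorem solve_spec : Claim_equal_solve := by
  intro N A B _ hpre
  unfold Spec_solve
  by_cases hN : N ≤ 0
  · have h0 : PySem.List.sorted ([] : List Int) (fun x => x) = [] := by
      rw [PySem.List.sorted_eq_nil_iff]
    rw [solve, solve_alt, pv_pyRange_nil hN, if_pos hN]
    simp [h0]
  · push_neg at hN
    have hNa : N ≤ (A.length : Int) := by rcases hpre with h | ⟨h1, h2⟩ <;> omega
    have hNb : N ≤ (B.length : Int) := by rcases hpre with h | ⟨h1, h2⟩ <;> omega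
    set n := N.toNat with hndef
    have hNn : N = (n : Int) := by omega
    have hna : n ≤ A.length := by omega
    have hnb : n ≤ B.length := by omega
    set A' := A.take n with hA'
    set B' := B.take n with hB'
    -- the merged encoding list of A
    have hT1 : (PySem.List.pyRange 0 N).map (fun i => 2 * PySem.List.pyGetD A i 0 + 1)
        = A'.map (fun a => 2 * a + 1) := by
      rw [hNn]; exact pv_map_pyGetD_take A (fun a => 2 * a + 1) n hna
    have hT2 : (PySem.List.pyRange 0 N).map (fun i => 2 * PySem.List.pyGetD B i 0)
        = B'.map (fun b => 2 * b) := by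
      rw [hNn]; exact pv_map_pyGetD_take B (fun b => 2 * b) n hnb
    set T : List Int := A'.map (fun a => 2 * a + 1) ++ B'.map (fun b => 2 * b) with hT
    set Ts := PySem.List.sorted T (fun x => x) with hTs
    -- Y: the pair-domination count
    set Y : Int := (A'.map (fun a => (B'.countP (fun b => decide (b ≤ a)) : Int))).sum with hY
    -- ===== the A side =====
    have hsolve : 2 * solve N A B = (n : Int) * ((n : Int) + 1) - 2 * Y := by
      rw [solve]
      simp only [hT1, hT2, ← hT, ← hTs, List.foldl_map]
      rw [sweep_formula]
      -- the number of odd encodings is n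
      have hm : Ts.countP pvOdd = n := by
        rw [(PySem.List.sorted_perm T (fun x => x) false).countP_eq, hT, List.countP_append]
        have e1 : (A'.map (fun a => 2 * a + 1)).countP pvOdd = A'.length := by
          rw [List.countP_map]
          apply List.countP_eq_length.mpr
          intro x _
          simp [Function.comp, pvOdd_enc_a]
        have e2 : (B'.map (fun b => 2 * b)).countP pvOdd = 0 := by
          rw [List.countP_map]
          apply List.countP_eq_zero.mpr
          intro x _
          simp [Function.comp, pvOdd_enc_b]
        have e3 : A'.length = n := by rw [hA', List.length_take]; omega
        omega
      -- the inversion count of the sorted list is Y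
      have hX : pvX Ts = Y := by
        have hpw : Ts.Pairwise (· ≤ ·) := by
          have := PySem.List.sorted_pairwise T (fun x => x)
          simpa using this
        rw [pvX_eq_pvC hpw, pvC_perm (PySem.List.sorted_perm T (fun x => x) false), hT,
          pvC_append,
          pvC_const_parity true (by intro x hx; rcases List.mem_map.mp hx with ⟨a, _, rfl⟩; exact pvOdd_enc_a a),
          pvC_const_parity false (by intro x hx; rcases List.mem_map.mp hx with ⟨b, _, rfl⟩; exact pvOdd_enc_b b)]
        rw [List.map_map]
        have : ((fun x => ((B'.map (fun b => 2 * b)).countP (pvCross x) : Int)) ∘ fun a => 2 * a + 1)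
            = fun a => (B'.countP (fun b => decide (b ≤ a)) : Int) := by
          funext a
          simp only [Function.comp_apply, List.countP_map]
          congr 1
          apply List.countP_congr
          intro b _
          simp only [Function.comp_apply, pvCross_enc]
        rw [this, hY]
        ring
      rw [hm, hX]
      ring
    -- ===== the B side =====
    have halt : 2 * solve_alt N A B = (n : Int) * ((n : Int) + 1) - 2 * Y := by
      rw [solve_alt, if_neg (by omega)]
      simp only
      rw [hNn, PySem.List.slice_to B (by positivity), PySem.List.slice_to A (by positivity)]
      simp only [Int.toNat_natCast]
      rw [pv_foldl_sub]
      set bs := PySem.List.sorted (B.take n) (fun x => x) with hbs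
      have hbslen : (bs.length : Int) = (n : Int) := by
        rw [hbs, PySem.List.length_sorted, List.length_take]
        omega
      have hbspw : bs.Pairwise (· ≤ ·) := by
        have := PySem.List.sorted_pairwise (B.take n) (fun x => x)
        simpa using this
      have hpoint : ∀ (a : Int),
          bsLoop bs a 0 (n : Int) = ((B.take n).countP (fun b => decide (b ≤ a)) : Int) := by
        intro a
        rw [← hbslen, bsLoop_count_full bs a hbspw,
          (PySem.List.sorted_perm (B.take n) (fun x => x) false).countP_eq]
      simp only [hpoint]
      rw [← hA', ← hB', ← hY]
      have heven : 2 * PySem.Int.floordiv ((n:Int) * ((n:Int) + 1)) 2 = (n:Int) * ((n:Int) + 1) := by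
        rcases Int.even_mul_succ_self (n : Int) with ⟨r, hr⟩
        rw [PySem.Int.floordiv_eq_ediv_of_pos (by norm_num)]
        omega
      omega
    omega
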